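-- pv_equiv track=rewrite | github.com/rezaprasetya241/CodeWars | number to digit.py | create_array_of_tiers
-- ===== SOURCE A (Python) =====
-- def create_array_of_tiers(n):
--     # your awesome code here
--     arr=list(str(n))
--     word = str(n)
--     for x in range(len(word)):
--         if(x==0):
--             arr[x] = arr[x]
--         elif(x>0):
--             arr[x] = arr[x-1]+arr[x]
--     return arr
-- ===== SOURCE B (Python) =====
-- def create_array_of_tiers(n):
--     s = str(n)
--     return [s[:i + 1] for i in range(len(s))]
-- ===== Notes on version B (the rewrite author's own statement) =====
-- stated objective: simpler
-- what changed: B derives every element independently as a prefix slice s[:i+1] of the original string, instead of A's in-place list mutation threading an accumulated prefix arr[x-1]+arr[x] through the loop.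
import Mathlib
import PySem

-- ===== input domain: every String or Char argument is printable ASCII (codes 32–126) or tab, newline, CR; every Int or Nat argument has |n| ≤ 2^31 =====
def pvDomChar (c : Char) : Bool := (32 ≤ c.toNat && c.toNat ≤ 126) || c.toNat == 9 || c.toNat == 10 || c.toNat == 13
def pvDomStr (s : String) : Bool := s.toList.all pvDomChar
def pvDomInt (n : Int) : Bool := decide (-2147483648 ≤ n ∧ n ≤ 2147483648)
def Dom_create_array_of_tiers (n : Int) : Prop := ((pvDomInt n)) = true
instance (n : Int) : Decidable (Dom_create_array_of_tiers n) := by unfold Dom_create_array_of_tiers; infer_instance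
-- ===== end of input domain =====

-- B builds each element independently as a prefix slice s[:i+1] of str(n), instead of A's
-- in-place mutation threading an accumulated prefix arr[x-1]+arr[x] through the loop (simpler).

-- ===== PORT A =====
-- loop body of A; arr[x] / arr[x-1] are always in range (x < len(arr)), so getD "" is exact
def pvStepA (arr : List String) (x : Nat) : List String :=
  if x == 0 then arr.set x (arr.getD x "")
  else arr.set x (arr.getD (x - 1) "" ++ arr.getD x "")

def create_array_of_tiers (n : Int) : List String :=
  let word := (PySem.Int.toStr n).toList        -- str(n)
  let arr := word.map (fun c => String.ofList [c])  -- list(str(n))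
  (List.range word.length).foldl pvStepA arr

-- ===== PORT B =====
def create_array_of_tiers_alt (n : Int) : List String :=
  let s := (PySem.Int.toStr n).toList           -- str(n)
  (List.range s.length).map (fun (i : Nat) => String.ofList (PySem.List.slice s none (some ((i : Int) + 1))))

-- ===== PRECONDITION & SPEC =====
def Spec_create_array_of_tiers (n : Int) (out : List String) : Prop := out = create_array_of_tiers_alt n
instance (n : Int) (out : List String) : Decidable (Spec_create_array_of_tiers n out) := by unfold Spec_create_array_of_tiers; infer_instance

-- ===== CLAIM (what is proved, stated in full; the proofs are below) =====
def Claim_equal_create_array_of_tiers : Prop := ∀ (n : Int), Dom_create_array_of_tiers n → Spec_create_array_of_tiers n (create_array_of_tiers n)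

-- ===== LEMMAS AND PROOFS =====

-- the prefix string of l of length i+1
def pvPref (l : List Char) (i : Nat) : String := String.ofList (l.take (i + 1))

-- Invariant of A's loop: after processing indices 0..k-1, the first k cells hold the
-- prefixes and the remaining cells are still the original single-character strings.
theorem pvInvA (l : List Char) (k : Nat) (hk : k ≤ l.length) :
    (List.range k).foldl pvStepA (l.map (fun c => String.ofList [c]))
      = (List.range k).map (pvPref l) ++ (l.map (fun c => String.ofList [c])).drop k := by
  induction k with
  | zero => simp
  | succ k ih =>
    have hk' : k < l.length := by omega
    have ih' := ih (by omega)
    rw [List.range_succ, List.foldl_append, ih']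
    simp only [List.foldl_cons, List.foldl_nil]
    set init := l.map (fun c => String.ofList [c]) with hinit
    have hinitlen : init.length = l.length := by simp [hinit]
    have hfstlen : ((List.range k).map (pvPref l)).length = k := by simp
    unfold pvStepA
    rcases Nat.eq_zero_or_pos k with hk0 | hkpos
    · subst hk0
      -- arr = init; set 0 (getD 0 "") = init, and the target first cell is pref 0
      rcases l with _ | ⟨c, rest⟩
      · simp at hk'
      · simp [hinit, pvPref]
    · -- k > 0 branch
      have hkne : (k == 0) = false := by simp; omega
      rw [hkne]
      simp only [Bool.false_eq_true, if_false]
      have hdrop : init.drop k = init[k] :: init.drop (k + 1) := by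
        rw [List.drop_eq_getElem_cons (by omega)]
      -- reads
      have hread1 : (((List.range k).map (pvPref l)) ++ init.drop k).getD (k - 1) "" = pvPref l (k - 1) := by
        rw [List.getD_eq_getElem?_getD, List.getElem?_append_left (by omega)]
        simp [hkpos]
      have hread2 : (((List.range k).map (pvPref l)) ++ init.drop k).getD k "" = init[k] := by
        rw [List.getD_eq_getElem?_getD, List.getElem?_append_right (by omega)]
        simp only [hfstlen, Nat.sub_self, hdrop, List.getElem?_cons_zero, Option.getD_some]
      rw [hread1, hread2]
      -- the write lands at position 0 of the dropped part
      rw [List.set_append]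
      simp only [hfstlen, Nat.lt_irrefl, if_false, Nat.sub_self]
      rw [hdrop]
      simp only [List.set_cons_zero]
      -- value written is the next prefix
      have hval : pvPref l (k - 1) ++ init[k]'(by omega) = pvPref l k := by
        have hget : init[k]'(by omega) = String.ofList [l[k]'hk'] := by simp [hinit]
        rw [hget]
        show String.ofList (l.take (k - 1 + 1)) ++ String.ofList [l[k]'hk'] = String.ofList (l.take (k + 1))
        have : k - 1 + 1 = k := by omega
        rw [this]
        have htake : l.take (k + 1) = l.take k ++ [l[k]'hk'] := by
          rw [List.take_add_one]; simp [hk']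
        rw [htake, String.ofList_append]
      rw [hval]
      simp

-- B's slice is the list prefix
theorem pvSliceB (l : List Char) (i : Nat) :
    PySem.List.slice l none (some ((i : Int) + 1)) = l.take (i + 1) := by
  have hb : some ((i : Int) + 1) = some (((i + 1 : Nat) : Int)) := by push_cast; ring_nf
  rw [hb, PySem.List.slice_to_natCast]

-- ===== VERDICT (by name: the statement is the Claim_ definition above) =====
theorem create_array_of_tiers_spec : Claim_equal_create_array_of_tiers := by
  intro n _
  unfold Spec_create_array_of_tiers
  simp only [create_array_of_tiers, create_array_of_tiers_alt]
  rw [pvInvA _ _ (le_refl _), List.drop_eq_nil_of_le (by simp), List.append_nil]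
  refine List.map_congr_left ?_
  intro i _
  rw [pvSliceB]
  rfl
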